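-- pv_equiv track=rewrite | github.com/ccctw-ma/leetcode | src/Difficult/DynamicTest/deleteString.py | deleteString
-- ===== SOURCE A (Python) =====
-- from functools import lru_cache, cache, reduce
--
-- def deleteString(s: str) -> int:
--     @cache
--     def fn(s, index):
--         if index == len(s):
--             return 0
--         span = 1
--         res = 1
--         while index + span * 2 <= len(s):
--             if s[index: index + span] == s[index + span: index + 2 * span]:
--                 res = max(res, 1 + fn(s, index + span))
--             span += 1
--         return res
--
--     return fn(s, 0)
-- ===== SOURCE B (Python) =====
-- def deleteString(s: str) -> int:
--     n = len(s)
--     if n == 0: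
--         return 0
--     # lcp[i][j] = length of longest common prefix of s[i:] and s[j:]
--     lcp = [[0] * (n + 1) for _ in range(n + 1)]
--     for i in range(n - 1, -1, -1):
--         for j in range(n - 1, -1, -1):
--             if s[i] == s[j]:
--                 lcp[i][j] = lcp[i + 1][j + 1] + 1
--     dp = [0] * (n + 1)
--     for i in range(n - 1, -1, -1):
--         best = 1
--         for span in range(1, (n - i) // 2 + 1):
--             if lcp[i][i + span] >= span:
--                 best = max(best, 1 + dp[i + span])
--         dp[i] = best
--     return dp[0]
-- ===== Notes on version B (the rewrite author's own statement) =====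
-- stated objective: alternative
-- what changed: Replaced A's memoized recursion, whose inner loop compares length-span substrings by slicing, with a bottom-up DP list built back-to-front over a precomputed longest-common-prefix table, so each block-equality test becomes a table lookup.
import Mathlib
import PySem

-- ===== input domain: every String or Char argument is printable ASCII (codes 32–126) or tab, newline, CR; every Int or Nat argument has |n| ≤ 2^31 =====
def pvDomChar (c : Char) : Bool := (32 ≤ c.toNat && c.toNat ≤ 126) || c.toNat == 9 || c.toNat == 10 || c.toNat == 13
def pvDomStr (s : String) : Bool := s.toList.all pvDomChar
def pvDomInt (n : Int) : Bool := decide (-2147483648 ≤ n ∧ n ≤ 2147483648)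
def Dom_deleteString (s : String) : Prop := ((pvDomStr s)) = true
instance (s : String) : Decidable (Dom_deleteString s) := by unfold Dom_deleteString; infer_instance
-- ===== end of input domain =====

-- B replaces A's memoized recursion with substring-slice comparisons by a bottom-up DP list built
-- back-to-front over a precomputed longest-common-prefix table, so each block-equality test is a
-- table lookup (objective: alternative).

-- ===== PORT A =====
-- A's inner fn is @cache-memoized; the port threads the cache as a PySem.Dict Nat Int.
-- In pvLoopA the Python loop variable span (which starts at 1) is represented as k + 1.
mutual
def pvFnA (l : List Char) (index : Nat) (memo : PySem.Dict Nat Int) : Int × PySem.Dict Nat Int :=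
  match memo.get? index with
  | some v => (v, memo)
  | none =>
    if index = l.length then (0, memo.insert index 0)
    else
      let p := pvLoopA l index 0 1 memo
      (p.1, p.2.insert index p.1)
termination_by (l.length - index, l.length + 2)

def pvLoopA (l : List Char) (index k : Nat) (res : Int) (memo : PySem.Dict Nat Int) :
    Int × PySem.Dict Nat Int :=
  if h : index + (k + 1) * 2 ≤ l.length then
    if PySem.List.slice l (some (index : Int)) (some ((index + (k + 1) : Nat) : Int)) =
        PySem.List.slice l (some ((index + (k + 1) : Nat) : Int))
          (some ((index + 2 * (k + 1) : Nat) : Int)) then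
      let q := pvFnA l (index + (k + 1)) memo
      pvLoopA l index (k + 1) (max res (1 + q.1)) q.2
    else
      pvLoopA l index (k + 1) res memo
  else (res, memo)
termination_by (l.length - index, l.length + 1 - (index + (k + 1) * 2))
end

def deleteString (s : String) : Int :=
  (pvFnA s.toList 0 PySem.Dict.empty).1

-- ===== PORT B =====
-- lcp[i][j] of Source B, computed by the same recurrence (s[i]==s[j] extends lcp[i+1][j+1])
def pvLcpB (l : List Char) (i j : Nat) : Nat :=
  if h : i < l.length ∧ j < l.length then
    if l[i]'h.1 = l[j]'h.2 then pvLcpB l (i + 1) (j + 1) + 1 else 0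
  else 0
termination_by l.length - i

-- inner loop of Source B: for span in range(1, (n - i) // 2 + 1)
def pvBest (l : List Char) (i : Nat) (dps : List Int) (span : Nat) (best : Int) : Int :=
  if span ≤ (l.length - i) / 2 then
    pvBest l i dps (span + 1)
      (if span ≤ pvLcpB l i (i + span) then max best (1 + dps.getD (span - 1) 0) else best)
  else best
termination_by (l.length - i) / 2 + 1 - span

-- the dp array built back to front: pvDp l m = [dp[n-m], ..., dp[n]]
def pvDp (l : List Char) : Nat → List Int
  | 0 => [0]
  | m + 1 => pvBest l (l.length - (m + 1)) (pvDp l m) 1 1 :: pvDp l m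

def deleteString_alt (s : String) : Int :=
  if s.toList.length = 0 then 0
  else (pvDp s.toList s.toList.length).headD 0

-- ===== PRECONDITION & SPEC =====
def Spec_deleteString (s : String) (out : Int) : Prop := out = deleteString_alt s
instance (s : String) (out : Int) : Decidable (Spec_deleteString s out) := by unfold Spec_deleteString; infer_instance

-- ===== CLAIM (what is proved, stated in full; the proofs are below) =====
def Claim_equal_deleteString : Prop := ∀ (s : String), Dom_deleteString s → Spec_deleteString s (deleteString s)

-- ===== LEMMAS AND PROOFS =====

-- pure (cache-free) model of A's fn
mutual
def pvFnP (l : List Char) (index : Nat) : Int :=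
  if index = l.length then 0 else pvLoopP l index 0 1
termination_by (l.length - index, l.length + 2)

def pvLoopP (l : List Char) (index k : Nat) (res : Int) : Int :=
  if h : index + (k + 1) * 2 ≤ l.length then
    pvLoopP l index (k + 1)
      (if PySem.List.slice l (some (index : Int)) (some ((index + (k + 1) : Nat) : Int)) =
          PySem.List.slice l (some ((index + (k + 1) : Nat) : Int))
            (some ((index + 2 * (k + 1) : Nat) : Int)) then
        max res (1 + pvFnP l (index + (k + 1)))
      else res)
  else res
termination_by (l.length - index, l.length + 1 - (index + (k + 1) * 2))
end

def pvInv (l : List Char) (memo : PySem.Dict Nat Int) : Prop :=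
  ∀ i v, memo.get? i = some v → v = pvFnP l i

mutual
theorem pvFnA_pure (l : List Char) (index : Nat) (memo : PySem.Dict Nat Int)
    (hinv : pvInv l memo) :
    (pvFnA l index memo).1 = pvFnP l index ∧ pvInv l (pvFnA l index memo).2 := by
  rcases hmg : memo.get? index with _ | v
  · by_cases hlen : index = l.length
    · subst hlen
      refine ⟨?_, ?_⟩
      · simp [pvFnA, hmg, pvFnP]
      · simp only [pvFnA, hmg, if_true]
        intro i v hv
        rw [PySem.Dict.get?_insert] at hv
        split at hv
        · cases hv; simp_all [pvFnP]
        · exact hinv i v hv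
    · have hl := pvLoopA_pure l index 0 1 memo hinv
      refine ⟨?_, ?_⟩
      · simp [pvFnA, hmg, hlen, pvFnP, hl.1]
      · simp only [pvFnA, hmg, if_neg hlen]
        intro i v hv
        rw [PySem.Dict.get?_insert] at hv
        split at hv
        · cases hv; subst i; simp [hl.1, pvFnP, hlen]
        · exact hl.2 i v hv
  · have := hinv index v hmg
    constructor <;> simp [pvFnA, hmg, this, hinv]
termination_by (l.length - index, l.length + 2)

theorem pvLoopA_pure (l : List Char) (index k : Nat) (res : Int) (memo : PySem.Dict Nat Int)
    (hinv : pvInv l memo) :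
    (pvLoopA l index k res memo).1 = pvLoopP l index k res ∧
      pvInv l (pvLoopA l index k res memo).2 := by
  by_cases h : index + (k + 1) * 2 ≤ l.length
  · by_cases hc : PySem.List.slice l (some (index : Int)) (some ((index + (k + 1) : Nat) : Int)) =
        PySem.List.slice l (some ((index + (k + 1) : Nat) : Int))
          (some ((index + 2 * (k + 1) : Nat) : Int))
    · have hf := pvFnA_pure l (index + (k + 1)) memo hinv
      have hl := pvLoopA_pure l index (k + 1) (max res (1 + (pvFnA l (index + (k + 1)) memo).1))
        (pvFnA l (index + (k + 1)) memo).2 hf.2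
      rw [pvLoopA, pvLoopP]
      simp only [dif_pos h, if_pos hc, hf.1] at hl ⊢
      exact hl
    · have hl := pvLoopA_pure l index (k + 1) res memo hinv
      rw [pvLoopA, pvLoopP]
      simp only [dif_pos h, if_neg hc] at hl ⊢
      exact hl
  · rw [pvLoopA, pvLoopP]
    simp only [dif_neg h]
    exact ⟨trivial, hinv⟩
termination_by (l.length - index, l.length + 1 - (index + (k + 1) * 2))
end

-- longest common prefix of two lists
def pvLcpLen : List Char → List Char → Nat
  | a :: xs, b :: ys => if a = b then pvLcpLen xs ys + 1 else 0
  | _, _ => 0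

theorem pvLcpB_eq (l : List Char) (i j : Nat) :
    pvLcpB l i j = pvLcpLen (l.drop i) (l.drop j) := by
  rw [pvLcpB]
  by_cases h : i < l.length ∧ j < l.length
  · rw [dif_pos h]
    have hi : l.drop i = l[i] :: l.drop (i + 1) := List.drop_eq_getElem_cons h.1
    have hj : l.drop j = l[j] :: l.drop (j + 1) := List.drop_eq_getElem_cons h.2
    rw [hi, hj, pvLcpLen]
    have := pvLcpB_eq l (i + 1) (j + 1)
    split_ifs <;> simp_all
  · rw [dif_neg h]
    rcases not_and_or.mp h with h1 | h1
    · rw [List.drop_of_length_le (by omega)]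
      cases l.drop j <;> rfl
    · rw [List.drop_of_length_le (l := l) (i := j) (by omega)]
      cases l.drop i <;> rfl
termination_by l.length - i

theorem pvTake_eq_iff (span : Nat) (xs ys : List Char) (hx : span ≤ xs.length)
    (hy : span ≤ ys.length) : xs.take span = ys.take span ↔ span ≤ pvLcpLen xs ys := by
  induction span generalizing xs ys with
  | zero => simp
  | succ n ih =>
    match xs, ys with
    | a :: xs, b :: ys =>
      simp only [List.take_succ_cons, List.length_cons] at *
      rw [pvLcpLen]
      constructor
      · rintro h
        have hab : a = b := by injection h
        have := (ih xs ys (by omega) (by omega)).mp (by injection h)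
        rw [hab, if_pos rfl]
        omega
      · intro h
        split_ifs at h with hab
        · rw [hab, (ih xs ys (by omega) (by omega)).mpr (by omega)]
        · omega

theorem pvCond_iff (l : List Char) (i sp : Nat) (h : i + 2 * sp ≤ l.length) :
    (PySem.List.slice l (some (i : Int)) (some ((i + sp : Nat) : Int)) =
      PySem.List.slice l (some ((i + sp : Nat) : Int)) (some ((i + 2 * sp : Nat) : Int))) ↔
    sp ≤ pvLcpB l i (i + sp) := by
  rw [PySem.List.slice_natCast, PySem.List.slice_natCast, pvLcpB_eq]
  have e1 : i + sp - i = sp := by omega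
  have e2 : i + 2 * sp - (i + sp) = sp := by omega
  rw [e1, e2]
  exact pvTake_eq_iff sp _ _ (by simp; omega) (by simp; omega)

theorem pvLoop_eq (l : List Char) (i : Nat) (dps : List Int)
    (hdps : ∀ t, t < l.length - i → dps.getD t 0 = pvFnP l (i + 1 + t)) (k : Nat) (res : Int) :
    pvLoopP l i k res = pvBest l i dps (k + 1) res := by
  rw [pvLoopP, pvBest]
  by_cases h : i + (k + 1) * 2 ≤ l.length
  · have h2 : k + 1 ≤ (l.length - i) / 2 := by omega
    rw [dif_pos h, if_pos h2]
    have hcond := pvCond_iff l i (k + 1) (by omega)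
    have hget : dps.getD (k + 1 - 1) 0 = pvFnP l (i + (k + 1)) := by
      have := hdps k (by omega)
      simpa [Nat.add_assoc, Nat.add_comm 1 k] using this
    by_cases hc : PySem.List.slice l (some (i : Int)) (some ((i + (k + 1) : Nat) : Int)) =
        PySem.List.slice l (some ((i + (k + 1) : Nat) : Int))
          (some ((i + 2 * (k + 1) : Nat) : Int))
    · rw [if_pos hc, if_pos (hcond.mp hc), hget]
      exact pvLoop_eq l i dps hdps (k + 1) _
    · rw [if_neg hc, if_neg (fun hle => hc (hcond.mpr hle))]
      exact pvLoop_eq l i dps hdps (k + 1) _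
  · have h2 : ¬ (k + 1 ≤ (l.length - i) / 2) := by omega
    rw [dif_neg h, if_neg h2]
termination_by l.length + 1 - (i + (k + 1) * 2)

theorem pvDp_eq (l : List Char) (m : Nat) (hm : m ≤ l.length) :
    pvDp l m = (List.range (m + 1)).map (fun t => pvFnP l (l.length - m + t)) := by
  induction m with
  | zero =>
    simp [pvDp, List.range_succ, pvFnP]
  | succ m ih =>
    have ih' := ih (by omega)
    have hhead : pvBest l (l.length - (m + 1))
        ((List.range (m + 1)).map (fun t => pvFnP l (l.length - m + t))) 1 1 =
        pvFnP l (l.length - (m + 1)) := by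
      rw [← pvLoop_eq l (l.length - (m + 1)) _ ?_ 0 1]
      · rw [pvFnP, if_neg (by omega)]
      · intro t ht
        have ht' : t < m + 1 := by omega
        rw [List.getD_eq_getElem _ _ (by simpa using ht')]
        simp only [List.getElem_map, List.getElem_range]
        congr 1
        omega
    rw [pvDp, ih', hhead]
    apply List.ext_getElem
    · simp
    · intro idx h1 h2
      cases idx with
      | zero =>
        simp
      | succ j =>
        simp only [List.getElem_cons_succ, List.getElem_map, List.getElem_range]
        congr 1
        omega

theorem pvFnP_zero_eq_alt (s : String) : pvFnP s.toList 0 = deleteString_alt s := by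
  rw [deleteString_alt]
  by_cases h0 : s.toList.length = 0
  · rw [if_pos h0, pvFnP, if_pos h0.symm]
  · rw [if_neg h0]
    rw [pvDp_eq s.toList s.toList.length le_rfl]
    have : 0 < s.toList.length + 1 := by omega
    rw [List.range_succ_eq_map]
    simp

-- ===== VERDICT (by name: the statement is the Claim_ definition above) =====
theorem deleteString_spec : Claim_equal_deleteString := by
  intro s _
  show deleteString s = deleteString_alt s
  rw [deleteString, (pvFnA_pure s.toList 0 PySem.Dict.empty (by
      intro i v hv
      simp [PySem.Dict.get?_empty] at hv)).1]
  exact pvFnP_zero_eq_alt s
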